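-- pv_equiv track=rewrite | github.com/satojkovic/algorithms | kickstart/2021/l_shape.py | get_row_count
-- ===== SOURCE A (Python) =====
-- def get_row_count(row_seg, col_seg, R, C):
--     count = 0
--     col = 2
--     for row in range(4, R + 1, 2):
--         if row_seg < row or col_seg < col:
--             break
--         if row_seg >= row and col_seg >= col:
--             count += 1
--         col += 1
--     return count
-- ===== SOURCE B (Python) =====
-- def get_row_count(row_seg, col_seg, R, C):
--     # Closed form: the loop of A counts k = 0,1,2,... while
--     # row = 4+2k <= min(row_seg, R) and col = 2+k <= col_seg,
--     # i.e. k <= min((R-4)//2, (row_seg-4)//2, col_seg-2).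
--     if R < 4:
--         return 0
--     k = min((R - 4) // 2, (row_seg - 4) // 2, col_seg - 2)
--     return max(0, k + 1)
-- ===== Notes on version B (the rewrite author's own statement) =====
-- stated objective: faster
-- what changed: Replaced A's O(R) loop over rows with a closed-form: the answer is the clamped minimum of three linear bounds, min((R-4)//2, (row_seg-4)//2, col_seg-2)+1, clamped to zero.
import Mathlib
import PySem

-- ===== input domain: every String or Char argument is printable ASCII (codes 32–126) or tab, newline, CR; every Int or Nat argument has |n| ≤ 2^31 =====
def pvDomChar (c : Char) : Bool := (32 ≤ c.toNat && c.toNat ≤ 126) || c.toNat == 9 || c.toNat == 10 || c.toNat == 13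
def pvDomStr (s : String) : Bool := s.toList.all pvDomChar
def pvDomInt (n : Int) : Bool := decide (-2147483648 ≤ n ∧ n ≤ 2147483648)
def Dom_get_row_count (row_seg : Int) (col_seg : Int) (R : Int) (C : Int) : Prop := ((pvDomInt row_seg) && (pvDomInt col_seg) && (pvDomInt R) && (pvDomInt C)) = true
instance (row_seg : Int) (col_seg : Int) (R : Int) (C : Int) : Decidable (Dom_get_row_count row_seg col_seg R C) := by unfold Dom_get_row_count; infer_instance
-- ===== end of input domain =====

-- B replaces A's O(R) loop with a closed form (clamped min of three linear bounds); objective: faster (asymptotic).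


-- ===== PORT A =====
-- 'for row in range(4, R+1, 2): … break …' ported as direct recursion on row (Python's range is
-- lazy, so the loop variable advances by 2 while row < R+1; break/continue conditions verbatim)
def get_row_count_loop (row_seg : Int) (col_seg : Int) (R : Int) (row : Int) (count : Int) (col : Int) : Int :=
  if _h : row < R + 1 then
    if row_seg < row ∨ col_seg < col then count
    else
      let count := if row_seg ≥ row ∧ col_seg ≥ col then count + 1 else count
      get_row_count_loop row_seg col_seg R (row + 2) count (col + 1)
  else count
termination_by (R + 1 - row).toNat
decreasing_by omega

def get_row_count (row_seg : Int) (col_seg : Int) (R : Int) (C : Int) : Int :=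
  get_row_count_loop row_seg col_seg R 4 0 2

-- ===== PORT B =====
def get_row_count_alt (row_seg : Int) (col_seg : Int) (R : Int) (C : Int) : Int :=
  if R < 4 then 0
  else max 0 (min (min (PySem.Int.floordiv (R - 4) 2) (PySem.Int.floordiv (row_seg - 4) 2)) (col_seg - 2) + 1)

-- ===== PRECONDITION & SPEC =====
def Spec_get_row_count (row_seg : Int) (col_seg : Int) (R : Int) (C : Int) (out : Int) : Prop := out = get_row_count_alt row_seg col_seg R C
instance (row_seg : Int) (col_seg : Int) (R : Int) (C : Int) (out : Int) : Decidable (Spec_get_row_count row_seg col_seg R C out) := by unfold Spec_get_row_count; infer_instance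

-- ===== CLAIM (what is proved, stated in full; the proofs are below) =====
def Claim_equal_get_row_count : Prop := ∀ (row_seg : Int) (col_seg : Int) (R : Int) (C : Int), Dom_get_row_count row_seg col_seg R C → Spec_get_row_count row_seg col_seg R C (get_row_count row_seg col_seg R C)

-- ===== LEMMAS AND PROOFS =====
-- Closed form of the loop on an arithmetic row list starting at `row`, with column counter `col`.
theorem get_row_count_loop_eq (row_seg col_seg R : Int) :
    ∀ (n : Nat) (row col c : Int), (R + 1 - row).toNat ≤ n →
      get_row_count_loop row_seg col_seg R row c col =
        c + (if row_seg < row ∨ col_seg < col ∨ R + 1 ≤ row then 0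
             else min (min ((row_seg - row) / 2) (col_seg - col)) ((R - row) / 2) + 1) := by
  intro n
  induction n with
  | zero =>
    intro row col c hn
    rw [get_row_count_loop]
    rw [dif_neg (by omega : ¬ row < R + 1)]
    rw [if_pos (by omega : row_seg < row ∨ col_seg < col ∨ R + 1 ≤ row)]
    omega
  | succ n ih =>
    intro row col c hn
    rw [get_row_count_loop]
    by_cases hr : row < R + 1
    · rw [dif_pos hr]
      by_cases hb : row_seg < row ∨ col_seg < col
      · rw [if_pos hb, if_pos (by omega)]; omega
      · rw [if_neg hb]
        have hge : row_seg ≥ row ∧ col_seg ≥ col := by omega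
        rw [if_pos hge]
        rw [ih (row + 2) (col + 1) (c + 1) (by omega)]
        rw [if_neg (by omega : ¬ (row_seg < row ∨ col_seg < col ∨ R + 1 ≤ row))]
        by_cases hb2 : row_seg < row + 2 ∨ col_seg < col + 1 ∨ R + 1 ≤ row + 2
        · rw [if_pos hb2]
          have h4 : (row_seg - row) / 2 = 0 ∨ col_seg - col = 0 ∨ (R - row) / 2 = 0 := by omega
          omega
        · rw [if_neg hb2]
          have h5 : (row_seg - row) / 2 = (row_seg - (row + 2)) / 2 + 1 := by omega
          have h6 : (R - row) / 2 = (R - (row + 2)) / 2 + 1 := by omega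
          omega
    · rw [dif_neg hr]
      rw [if_pos (by omega : row_seg < row ∨ col_seg < col ∨ R + 1 ≤ row)]
      omega

theorem get_row_count_spec : Claim_equal_get_row_count := by
  intro row_seg col_seg R C _hdom
  unfold Spec_get_row_count get_row_count get_row_count_alt
  rw [get_row_count_loop_eq row_seg col_seg R (R + 1 - 4).toNat 4 2 0 (by omega)]
  have hfd : ∀ a : Int, Int.fdiv a 2 = a / 2 := by
    intro a; rw [Int.fdiv_eq_ediv]; norm_num
  simp only [PySem.Int.floordiv, hfd]
  split_ifs <;> omega
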